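-- pv_equiv track=rewrite | github.com/ganesh2427/AGENTS | code_reviewer_agent/src/code_reviewer_agent/tools/code_analysis_tools.py | _format_security_report
-- ===== SOURCE A (Python) =====
-- from typing import List, Dict, Any, Optional
--
-- def _format_security_report(file_path: str, vulnerabilities: List[Dict]) -> str:
--     """Format security analysis report."""
--     if not vulnerabilities:
--         return f"## Security Analysis: {file_path}\n\nNo security issues detected! ✅"
--
--     report = f"## Security Analysis: {file_path}\n\n"
--     report += f"**Total vulnerabilities found:** {len(vulnerabilities)}\n\n"
--
--     # Group by severity
--     by_severity = {}
--     for vuln in vulnerabilities: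
--         severity = vuln['severity']
--         if severity not in by_severity:
--             by_severity[severity] = []
--         by_severity[severity].append(vuln)
--
--     for severity in ['Critical', 'High', 'Medium', 'Low']:
--         if severity in by_severity:
--             report += f"### {severity} Vulnerabilities ({len(by_severity[severity])})\n\n"
--             for vuln in by_severity[severity]:
--                 report += f"**{vuln['type']}** (Line {vuln['line']})\n"
--                 report += f"- **Description:** {vuln['description']}\n"
--                 report += f"- **Code:** `{vuln['code']}`\n"
--                 report += f"- **Recommendation:** {vuln['recommendation']}\n\n"
--
--     return report
-- ===== SOURCE B (Python) =====
-- def _format_security_report(file_path: str, vulnerabilities) -> str: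
--     """Format security analysis report (no grouping dict: one filtered scan per severity)."""
--     if not vulnerabilities:
--         return f"## Security Analysis: {file_path}\n\nNo security issues detected! ✅"
--
--     parts = [f"## Security Analysis: {file_path}\n\n",
--              f"**Total vulnerabilities found:** {len(vulnerabilities)}\n\n"]
--     for severity in ('Critical', 'High', 'Medium', 'Low'):
--         group = [v for v in vulnerabilities if v['severity'] == severity]
--         if group:
--             parts.append(f"### {severity} Vulnerabilities ({len(group)})\n\n")
--             parts.extend(
--                 f"**{v['type']}** (Line {v['line']})\n"
--                 f"- **Description:** {v['description']}\n"
--                 f"- **Code:** `{v['code']}`\n"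
--                 f"- **Recommendation:** {v['recommendation']}\n\n"
--                 for v in group)
--     return "".join(parts)
-- ===== Notes on version B (the rewrite author's own statement) =====
-- stated objective: simpler
-- what changed: Drops the by_severity grouping dict and its insertion loop; instead scans the list once per fixed severity with a filter and joins collected parts, keeping identical output bytes.
import Mathlib
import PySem

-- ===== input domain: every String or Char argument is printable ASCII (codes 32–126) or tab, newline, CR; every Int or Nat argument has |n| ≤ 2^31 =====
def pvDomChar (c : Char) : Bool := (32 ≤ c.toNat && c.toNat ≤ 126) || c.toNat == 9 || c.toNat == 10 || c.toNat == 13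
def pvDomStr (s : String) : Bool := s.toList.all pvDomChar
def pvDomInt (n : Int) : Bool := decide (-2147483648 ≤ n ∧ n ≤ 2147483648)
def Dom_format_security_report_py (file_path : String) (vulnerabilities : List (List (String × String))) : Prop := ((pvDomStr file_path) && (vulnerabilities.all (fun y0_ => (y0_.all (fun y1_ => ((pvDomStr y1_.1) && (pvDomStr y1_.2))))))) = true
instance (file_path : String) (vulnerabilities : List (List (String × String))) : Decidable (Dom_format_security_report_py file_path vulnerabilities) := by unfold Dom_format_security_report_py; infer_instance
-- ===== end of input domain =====

-- B drops A's by_severity grouping dict: it scans the list once per fixed severity with a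
-- filter and joins collected parts (objective: simpler); output bytes are identical.

-- ===== PORT A =====
-- vuln['k'] (dict lookup, first match); Pre_ guarantees the key is present where A reads it
def pvGet (v : List (String × String)) (k : String) : String :=
  (PySem.Dict.mk v).getD k ""

-- the four consecutive 'report +=' detail lines of one vulnerability
def pvDetail (v : List (String × String)) : String :=
  "**" ++ pvGet v "type" ++ "** (Line " ++ pvGet v "line" ++ ")\n" ++
  ("- **Description:** " ++ pvGet v "description" ++ "\n") ++
  ("- **Code:** `" ++ pvGet v "code" ++ "`\n") ++
  ("- **Recommendation:** " ++ pvGet v "recommendation" ++ "\n\n")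

-- body of A's grouping loop: if severity not in by_severity: by_severity[severity] = []; append
def pvStep (d : PySem.Dict String (List (List (String × String)))) (v : List (String × String)) :
    PySem.Dict String (List (List (String × String))) :=
  let sev := pvGet v "severity"
  let d := if d.contains sev then d else d.insert sev []
  d.insert sev (d.getD sev [] ++ [v])

def format_security_report_py (file_path : String) (vulnerabilities : List (List (String × String))) : String :=
  if vulnerabilities = [] then
    "## Security Analysis: " ++ file_path ++ "\n\nNo security issues detected! ✅"
  else
    let report := "## Security Analysis: " ++ file_path ++ "\n\n"
    let report := report ++ ("**Total vulnerabilities found:** " ++ PySem.Int.toStr (vulnerabilities.length : Int) ++ "\n\n")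
    let by_severity := vulnerabilities.foldl pvStep PySem.Dict.empty
    ["Critical", "High", "Medium", "Low"].foldl (fun report severity =>
      if by_severity.contains severity then
        let group := by_severity.getD severity []
        let report := report ++ ("### " ++ severity ++ " Vulnerabilities (" ++ PySem.Int.toStr (group.length : Int) ++ ")\n\n")
        group.foldl (fun r v => r ++ pvDetail v) report
      else report) report

-- ===== PORT B =====
def format_security_report_py_alt (file_path : String) (vulnerabilities : List (List (String × String))) : String :=
  if vulnerabilities = [] then
    "## Security Analysis: " ++ file_path ++ "\n\nNo security issues detected! ✅"
  else
    let parts := ["## Security Analysis: " ++ file_path ++ "\n\n",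
                  "**Total vulnerabilities found:** " ++ PySem.Int.toStr (vulnerabilities.length : Int) ++ "\n\n"]
    let parts := ["Critical", "High", "Medium", "Low"].foldl (fun parts severity =>
      let group := vulnerabilities.filter (fun v => pvGet v "severity" == severity)
      if group = [] then parts
      else (parts ++ ["### " ++ severity ++ " Vulnerabilities (" ++ PySem.Int.toStr (group.length : Int) ++ ")\n\n"])
             ++ group.map pvDetail) parts
    PySem.Str.join "" parts

-- ===== PRECONDITION & SPEC =====
-- Pre_ excludes exactly the inputs where the Python A raises KeyError: a vuln without a
-- 'severity' key, or a vuln in one of the four reported severities missing a detail key.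
def Pre_format_security_report_py (file_path : String) (vulnerabilities : List (List (String × String))) : Prop :=
  ∀ v ∈ vulnerabilities,
    (PySem.Dict.mk v).contains "severity" = true ∧
    (pvGet v "severity" ∈ (["Critical", "High", "Medium", "Low"] : List String) →
      (PySem.Dict.mk v).contains "type" = true ∧
      (PySem.Dict.mk v).contains "line" = true ∧
      (PySem.Dict.mk v).contains "description" = true ∧
      (PySem.Dict.mk v).contains "code" = true ∧
      (PySem.Dict.mk v).contains "recommendation" = true)
instance (file_path : String) (vulnerabilities : List (List (String × String))) : Decidable (Pre_format_security_report_py file_path vulnerabilities) := by unfold Pre_format_security_report_py; infer_instance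

def pvWitness_format_security_report_py : String × (List (List (String × String))) :=
  ("app.py", [[("severity", "High"), ("type", "SQLi"), ("line", "3"),
               ("description", "d"), ("code", "c"), ("recommendation", "r")],
              [("severity", "Info")]])

def Spec_format_security_report_py (file_path : String) (vulnerabilities : List (List (String × String))) (out : String) : Prop := out = format_security_report_py_alt file_path vulnerabilities
instance (file_path : String) (vulnerabilities : List (List (String × String))) (out : String) : Decidable (Spec_format_security_report_py file_path vulnerabilities out) := by unfold Spec_format_security_report_py; infer_instance

-- ===== CLAIM (what is proved, stated in full; the proofs are below) =====
def Claim_equal_format_security_report_py : Prop := ∀ (file_path : String) (vulnerabilities : List (List (String × String))), Dom_format_security_report_py file_path vulnerabilities → Pre_format_security_report_py file_path vulnerabilities → Spec_format_security_report_py file_path vulnerabilities (format_security_report_py file_path vulnerabilities)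

-- ===== LEMMAS AND PROOFS =====

theorem cjoin_cons (x : List Char) (l : List (List Char)) :
    PySem.Chars.join [] (x :: l) = x ++ PySem.Chars.join [] l := by
  cases l <;> simp [PySem.Chars.join_singleton, PySem.Chars.join_cons_cons, PySem.Chars.join_nil]

theorem sjoin_append (a b : List String) :
    PySem.Str.join "" (a ++ b) = PySem.Str.join "" a ++ PySem.Str.join "" b := by
  apply String.ext
  simp [PySem.Str.join]
  induction a with
  | nil => simp [PySem.Chars.join_nil]
  | cons p ps ih => simp [cjoin_cons, ih]

theorem sjoin_pair (a b : String) : PySem.Str.join "" [a, b] = a ++ b := by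
  apply String.ext
  simp [PySem.Str.join, PySem.Chars.join_cons_cons, PySem.Chars.join_singleton]

theorem sjoin_singleton (x : String) : PySem.Str.join "" [x] = x := by
  apply String.ext; simp [PySem.Str.join, PySem.Chars.join_singleton]

theorem str_append_assoc (a b c : String) : a ++ b ++ c = a ++ (b ++ c) := by
  apply String.ext; simp

-- one step of A's grouping loop, on getD
theorem pvStep_getD (d : PySem.Dict String (List (List (String × String))))
    (v : List (String × String)) (s : String) :
    (pvStep d v).getD s [] =
      if pvGet v "severity" == s then d.getD s [] ++ [v] else d.getD s [] := by
  unfold pvStep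
  by_cases hs : pvGet v "severity" = s
  · subst hs
    by_cases hc : d.contains (pvGet v "severity")
    · simp [hc, PySem.Dict.getD_insert]
    · simp [hc, PySem.Dict.getD_insert, PySem.Dict.getD_of_not_contains]
  · have hne : s ≠ pvGet v "severity" := fun h => hs h.symm
    by_cases hc : d.contains (pvGet v "severity") <;>
      simp [hc, hs, PySem.Dict.getD_insert, hne]

theorem pvStep_contains (d : PySem.Dict String (List (List (String × String))))
    (v : List (String × String)) (s : String) :
    (pvStep d v).contains s = (pvGet v "severity" == s || d.contains s) := by
  unfold pvStep
  by_cases hc : d.contains (pvGet v "severity") <;>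
    simp [hc, PySem.Dict.contains_insert, BEq.comm]

-- the grouping dict's entry at s is the filter of the scanned prefix
theorem foldl_pvStep_getD (l : List (List (String × String)))
    (d : PySem.Dict String (List (List (String × String)))) (s : String) :
    (l.foldl pvStep d).getD s [] = d.getD s [] ++ l.filter (fun v => pvGet v "severity" == s) := by
  induction l generalizing d with
  | nil => simp
  | cons v vs ih =>
    simp only [List.foldl_cons, List.filter_cons, ih, pvStep_getD]
    by_cases h : pvGet v "severity" == s <;> simp [h]

theorem foldl_pvStep_contains (l : List (List (String × String)))
    (d : PySem.Dict String (List (List (String × String)))) (s : String) :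
    (l.foldl pvStep d).contains s = (d.contains s || l.any (fun v => pvGet v "severity" == s)) := by
  induction l generalizing d with
  | nil => simp
  | cons v vs ih =>
    simp only [List.foldl_cons, List.any_cons, ih, pvStep_contains]
    by_cases h : pvGet v "severity" == s <;> simp [h]

-- A's inner 'report +=' loop appends the joined detail blocks
theorem foldl_detail (g : List (List (String × String))) (r : String) :
    g.foldl (fun r v => r ++ pvDetail v) r = r ++ PySem.Str.join "" (g.map pvDetail) := by
  induction g generalizing r with
  | nil => apply String.ext; simp [PySem.Str.join, PySem.Chars.join_nil]
  | cons v vs ih =>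
    apply String.ext
    simp [ih, PySem.Str.join, cjoin_cons]

-- both severity loops, run from any aligned accumulators, stay aligned
theorem sev_loops_eq (vulns : List (List (String × String)))
    (sevs : List String) (r : String) (parts : List String)
    (halign : r = PySem.Str.join "" parts) :
    sevs.foldl (fun report severity =>
      if (vulns.foldl pvStep PySem.Dict.empty).contains severity then
        let group := (vulns.foldl pvStep PySem.Dict.empty).getD severity []
        let report := report ++ ("### " ++ severity ++ " Vulnerabilities (" ++ PySem.Int.toStr (group.length : Int) ++ ")\n\n")
        group.foldl (fun r v => r ++ pvDetail v) report
      else report) r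
    = PySem.Str.join "" (sevs.foldl (fun parts severity =>
        let group := vulns.filter (fun v => pvGet v "severity" == severity)
        if group = [] then parts
        else (parts ++ ["### " ++ severity ++ " Vulnerabilities (" ++ PySem.Int.toStr (group.length : Int) ++ ")\n\n"])
               ++ group.map pvDetail) parts) := by
  induction sevs generalizing r parts with
  | nil => simpa using halign
  | cons s ss ih =>
    simp only [List.foldl_cons]
    apply ih
    have hg : (vulns.foldl pvStep PySem.Dict.empty).getD s [] =
        vulns.filter (fun v => pvGet v "severity" == s) := by
      simpa using foldl_pvStep_getD vulns PySem.Dict.empty s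
    have hc : (vulns.foldl pvStep PySem.Dict.empty).contains s =
        vulns.any (fun v => pvGet v "severity" == s) := by
      simpa using foldl_pvStep_contains vulns PySem.Dict.empty s
    by_cases hne : vulns.filter (fun v => pvGet v "severity" == s) = []
    · have : vulns.any (fun v => pvGet v "severity" == s) = false := by
        rw [List.any_eq_false]
        intro v hv hp
        have hvf : v ∈ List.filter (fun v => pvGet v "severity" == s) vulns :=
          List.mem_filter.mpr ⟨hv, hp⟩
        rw [hne] at hvf
        simp at hvf
      simp [hc, this, hne, halign]
    · have : vulns.any (fun v => pvGet v "severity" == s) = true := by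
        rcases List.ne_nil_iff_exists_cons.mp hne with ⟨v, vs, hcons⟩
        have hv : v ∈ vulns.filter (fun v => pvGet v "severity" == s) := by simp [hcons]
        rcases List.mem_filter.mp hv with ⟨hvmem, hvp⟩
        exact List.any_eq_true.mpr ⟨v, hvmem, hvp⟩
      simp only [hc, this, if_true, hne, if_false, hg]
      rw [foldl_detail, halign, sjoin_append, sjoin_append, sjoin_singleton, str_append_assoc]

-- ===== VERDICT (by name: the statement is the Claim_ definition above) =====
theorem format_security_report_py_spec : Claim_equal_format_security_report_py := by
  intro file_path vulns _ _
  unfold Spec_format_security_report_py format_security_report_py format_security_report_py_alt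
  by_cases hnil : vulns = []
  · simp [hnil]
  · simp only [hnil, if_false]
    exact sev_loops_eq vulns _ _ _ (by rw [sjoin_pair])
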